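-- pv_equiv track=rewrite | github.com/KooHyunJung/algorithm | algorithm90-100.py | solution7
-- ===== SOURCE A (Python) =====
-- def solution7(genres, plays):
--     answer = []
--
--     dic1 = {}
--     dic2 = {}
--
--     for num, (genre, play) in enumerate(zip(genres, plays)):
--         if genre not in dic1:
--             dic1[genre] = [(num, play)]
--         else:
--             dic1[genre].append((num, play))
--
--         if genre not in dic2:
--             dic2[genre] = play
--         else:
--             dic2[genre] += play
--
--     for (k, v) in sorted(dic2.items(), key=lambda x:x[1], reverse=True):
--         for (i, p) in sorted(dic1[k], key=lambda x:x[1], reverse=True)[:2]: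
--             answer.append(i)
--
--     return answer
-- ===== SOURCE B (Python) =====
-- def solution7(genres, plays):
--     # One global stable sort of all tracks by plays (descending) replaces A's
--     # per-genre sorts: a single counting pass then picks the first two tracks
--     # seen for each genre.
--     pairs = list(zip(genres, plays))
--
--     totals = {}
--     for g, p in pairs:
--         totals[g] = totals.get(g, 0) + p
--
--     top2 = {}
--     for i, (g, p) in sorted(enumerate(pairs), key=lambda t: -t[1][1]):
--         if len(top2.get(g, [])) < 2:
--             top2[g] = top2.get(g, []) + [i]
--
--     answer = []
--     for g in sorted(totals, key=lambda g: -totals[g]):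
--         answer += top2[g]
--     return answer
-- ===== Notes on version B (the rewrite author's own statement) =====
-- stated objective: alternative
-- what changed: Replaces A's per-genre sorts of grouped track lists by one global stable sort of all tracks by plays descending followed by a single counting pass that keeps the first two tracks seen per genre; the genre order comes from sorting the totals dict's keys by negated total instead of its items with reverse=True.
import Mathlib
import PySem

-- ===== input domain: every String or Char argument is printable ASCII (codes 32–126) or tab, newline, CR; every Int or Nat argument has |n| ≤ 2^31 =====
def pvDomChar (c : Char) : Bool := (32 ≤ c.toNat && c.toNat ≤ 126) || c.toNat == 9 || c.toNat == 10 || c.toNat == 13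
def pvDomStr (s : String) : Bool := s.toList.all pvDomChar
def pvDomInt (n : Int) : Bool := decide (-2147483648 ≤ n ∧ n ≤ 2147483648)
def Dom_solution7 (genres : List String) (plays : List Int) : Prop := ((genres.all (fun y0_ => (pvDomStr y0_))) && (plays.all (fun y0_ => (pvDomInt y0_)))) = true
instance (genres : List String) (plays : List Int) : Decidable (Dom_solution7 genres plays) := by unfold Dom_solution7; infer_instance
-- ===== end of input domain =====

-- B replaces A's per-genre sorts by one global stable sort by plays plus a
-- counting pass keeping the first two tracks per genre (alternative decomposition,
-- same asymptotic cost).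

-- ===== PORT A =====
-- the loop body's two dict updates, kept as two helpers over the pair state
def stepA1 (d : PySem.Dict String (List (Int × Int))) (t : Int × String × Int) :
    PySem.Dict String (List (Int × Int)) :=
  if d.contains t.2.1 then d.insert t.2.1 (d.getD t.2.1 [] ++ [(t.1, t.2.2)])
  else d.insert t.2.1 [(t.1, t.2.2)]

def stepA2 (d : PySem.Dict String Int) (t : Int × String × Int) : PySem.Dict String Int :=
  if d.contains t.2.1 then d.insert t.2.1 (d.getD t.2.1 0 + t.2.2)
  else d.insert t.2.1 t.2.2

def dicsA (genres : List String) (plays : List Int) :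
    PySem.Dict String (List (Int × Int)) × PySem.Dict String Int :=
  (PySem.List.enumerate (genres.zip plays)).foldl
    (fun d t => (stepA1 d.1 t, stepA2 d.2 t)) (PySem.Dict.empty, PySem.Dict.empty)

def solution7 (genres : List String) (plays : List Int) : List Int :=
  (PySem.List.sorted (dicsA genres plays).2.items (fun x => x.2) true).foldl
    (fun acc kv =>
      ((PySem.List.sorted ((dicsA genres plays).1.getD kv.1 []) (fun x => x.2) true).take 2).foldl
        (fun acc ip => acc ++ [ip.1]) acc)
    []

-- ===== PORT B =====
def totalsB (pairs : List (String × Int)) : PySem.Dict String Int :=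
  pairs.foldl (fun d gp => d.insert gp.1 (d.getD gp.1 0 + gp.2)) PySem.Dict.empty

def top2B (pairs : List (String × Int)) : PySem.Dict String (List Int) :=
  (PySem.List.sorted (PySem.List.enumerate pairs) (fun t => -t.2.2) false).foldl
    (fun d t =>
      if (d.getD t.2.1 []).length < 2 then d.insert t.2.1 (d.getD t.2.1 [] ++ [t.1]) else d)
    PySem.Dict.empty

def solution7_alt (genres : List String) (plays : List Int) : List Int :=
  (PySem.List.sorted (totalsB (genres.zip plays)).keys
      (fun g => -((totalsB (genres.zip plays)).getD g 0)) false).foldl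
    (fun acc g => acc ++ (top2B (genres.zip plays)).getD g []) []

-- ===== PRECONDITION & SPEC =====
def Spec_solution7 (genres : List String) (plays : List Int) (out : List Int) : Prop := out = solution7_alt genres plays
instance (genres : List String) (plays : List Int) (out : List Int) : Decidable (Spec_solution7 genres plays out) := by unfold Spec_solution7; infer_instance

-- ===== CLAIM (what is proved, stated in full; the proofs are below) =====
def Claim_equal_solution7 : Prop := ∀ (genres : List String) (plays : List Int), Dom_solution7 genres plays → Spec_solution7 genres plays (solution7 genres plays)

-- ===== LEMMAS AND PROOFS =====

theorem insertBy_forall_before {α : Type} (bf : α → α → Bool) (x : α) (l : List α)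
    (h : ∀ y ∈ l, bf x y = true) : PySem.List.insertBy bf x l = x :: l := by
  cases l with
  | nil => rfl
  | cons y ys => simp [PySem.List.insertBy, h y (by simp)]

theorem insertBy_map {α β : Type} (f : α → β) (bf : β → β → Bool) (x : α) (l : List α) :
    PySem.List.insertBy bf (f x) (l.map f)
      = (PySem.List.insertBy (fun a b => bf (f a) (f b)) x l).map f := by
  induction l with
  | nil => rfl
  | cons y ys ih =>
      simp only [List.map_cons, PySem.List.insertBy]
      by_cases h : bf (f x) (f y) = true <;> simp [h, ih]

theorem insertBy_congr {α : Type} (bf1 bf2 : α → α → Bool) (x : α) (l : List α)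
    (h : ∀ y ∈ l, bf1 x y = bf2 x y) :
    PySem.List.insertBy bf1 x l = PySem.List.insertBy bf2 x l := by
  induction l with
  | nil => rfl
  | cons y ys ih =>
      simp only [PySem.List.insertBy]
      rw [h y (by simp)]
      by_cases h2 : bf2 x y = true <;>
        simp [h2, ih (fun z hz => h z (by simp [hz]))]

theorem filter_insertBy {α : Type} (key : α → Int) (p : α → Bool) (x : α) (l : List α)
    (h : l.Pairwise (fun a b => key a ≤ key b)) :
    (PySem.List.insertBy (fun a b => decide (key a < key b)) x l).filter p
      = if p x then PySem.List.insertBy (fun a b => decide (key a < key b)) x (l.filter p)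
        else l.filter p := by
  induction l with
  | nil => by_cases hx : p x = true <;> simp [PySem.List.insertBy, hx]
  | cons y ys ih =>
      rcases List.pairwise_cons.mp h with ⟨hy, hys⟩
      by_cases hxy : key x < key y
      · have hall : ∀ z ∈ List.filter p (y :: ys), (fun a b => decide (key a < key b)) x z = true := by
          intro z hz
          have hz' : z ∈ y :: ys := List.mem_of_mem_filter hz
          rcases List.mem_cons.mp hz' with h1 | h1
          · simp [h1, hxy]
          · simp [lt_of_lt_of_le hxy (hy z h1)]
        have hli := insertBy_forall_before (fun a b => decide (key a < key b)) x
          (List.filter p (y :: ys)) hall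
        by_cases hx : p x = true
        · rw [if_pos hx, hli]
          simp [PySem.List.insertBy, hxy, hx]
        · rw [if_neg hx]
          simp [PySem.List.insertBy, hxy, hx, List.filter_cons]
      · simp only [PySem.List.insertBy, decide_eq_true_eq, hxy, if_false]
        by_cases hpy : p y = true <;> by_cases hx : p x = true <;>
          simp [List.filter_cons, hpy, hx, ih hys, PySem.List.insertBy, hxy]

theorem sorted_snoc {α : Type} (key : α → Int) (xs : List α) (x : α) :
    PySem.List.sorted (xs ++ [x]) key false
      = PySem.List.insertBy (fun a b => decide (key a < key b)) x
          (PySem.List.sorted xs key false) := by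
  rw [PySem.List.sorted_eq_foldl_insertBy, PySem.List.sorted_eq_foldl_insertBy,
    List.foldl_append]
  rfl

theorem sorted_filter {α : Type} (key : α → Int) (p : α → Bool) (xs : List α) :
    (PySem.List.sorted xs key false).filter p
      = PySem.List.sorted (xs.filter p) key false := by
  induction xs using List.reverseRecOn with
  | nil => rfl
  | append_singleton xs x ih =>
      rw [sorted_snoc, filter_insertBy key p x _ (PySem.List.sorted_pairwise xs key),
        ih, List.filter_append, List.filter_cons]
      by_cases hx : p x = true <;> simp [hx, sorted_snoc]

theorem sorted_map {α β : Type} (f : α → β) (key : β → Int) (xs : List α) :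
    PySem.List.sorted (xs.map f) key false
      = (PySem.List.sorted xs (fun a => key (f a)) false).map f := by
  induction xs using List.reverseRecOn with
  | nil => rfl
  | append_singleton xs x ih =>
      rw [List.map_append, List.map_singleton, sorted_snoc, ih, sorted_snoc,
        insertBy_map f (fun a b => decide (key a < key b)) x]

theorem sorted_congr {α : Type} (k1 k2 : α → Int) (xs : List α)
    (h : ∀ x ∈ xs, k1 x = k2 x) :
    PySem.List.sorted xs k1 false = PySem.List.sorted xs k2 false := by
  induction xs using List.reverseRecOn with
  | nil => rfl
  | append_singleton xs x ih =>
      have hx : k1 x = k2 x := h x (by simp)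
      have ih' := ih (fun z hz => h z (by simp [hz]))
      rw [sorted_snoc, sorted_snoc, ih', insertBy_congr _ (fun a b => decide (k2 a < k2 b))]
      intro y hy
      have : y ∈ xs := (PySem.List.mem_sorted xs k2 false y).mp hy
      rw [hx, h y (by simp [this])]

theorem sorted_rev_neg {α : Type} (key : α → Int) (xs : List α) :
    PySem.List.sorted xs key true = PySem.List.sorted xs (fun a => -key a) false := by
  rw [PySem.List.sorted_rev_eq_foldl_insertBy, PySem.List.sorted_eq_foldl_insertBy]
  have : (fun (a b : α) => decide (-key a < -key b)) = fun a b => decide (key b < key a) := by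
    funext a b; simp
  rw [this]

-- Dict helper lemmas specific to this file's String-keyed dicts
theorem dict_getD_insert_self {ν : Type} (d : PySem.Dict String ν) (k : String) (v dflt : ν) :
    (d.insert k v).getD k dflt = v := by
  simp [PySem.Dict.getD, PySem.Dict.get?_insert_self]

theorem dict_getD_insert_of_ne {ν : Type} (d : PySem.Dict String ν) {k k' : String}
    (v dflt : ν) (h : k' ≠ k) : (d.insert k v).getD k' dflt = d.getD k' dflt := by
  simp [PySem.Dict.getD, PySem.Dict.get?_insert_of_ne _ _ h]

theorem dict_getD_of_not_contains {ν : Type} (d : PySem.Dict String ν) (k : String)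
    (dflt : ν) (h : d.contains k = false) : d.getD k dflt = dflt := by
  simp only [PySem.Dict.contains, List.any_eq_false] at h
  have : d.items.find? (fun p => p.1 == k) = none := List.find?_eq_none.mpr h
  simp [PySem.Dict.getD, PySem.Dict.get?, this]

def KeysNodup {ν : Type} (d : PySem.Dict String ν) : Prop :=
  d.items.Pairwise (fun p q => p.1 ≠ q.1)

theorem keysNodup_insert {ν : Type} (d : PySem.Dict String ν) (k : String) (v : ν)
    (h : KeysNodup d) : KeysNodup (d.insert k v) := by
  unfold KeysNodup at *
  unfold PySem.Dict.insert
  by_cases hc : d.contains k = true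
  · rw [if_pos hc]
    refine List.pairwise_map.mpr (h.imp ?_)
    intro p q hpq
    by_cases hp : (p.1 == k) = true <;> by_cases hq : (q.1 == k) = true <;>
      simp_all
  · rw [if_neg hc]
    have hc' : ∀ p ∈ d.items, ¬(p.1 == k) = true := by
      intro p hp hpk
      exact hc (List.any_eq_true.mpr ⟨p, hp, hpk⟩)
    refine List.pairwise_append.mpr ⟨h, List.pairwise_singleton _ _, ?_⟩
    intro p hp q hq
    simp only [List.mem_singleton] at hq
    subst hq
    intro he
    exact hc' p hp (by simp [he])

theorem keysNodup_totalsB (pairs : List (String × Int)) : KeysNodup (totalsB pairs) := by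
  unfold totalsB
  have : ∀ (l : List (String × Int)) (d : PySem.Dict String Int), KeysNodup d →
      KeysNodup (l.foldl (fun d gp => d.insert gp.1 (d.getD gp.1 0 + gp.2)) d) := by
    intro l
    induction l with
    | nil => intro d hd; exact hd
    | cons gp l ih => intro d hd; exact ih _ (keysNodup_insert _ _ _ hd)
  exact this _ _ (List.Pairwise.nil)

theorem find?_of_mem_nodup {ν : Type} (l : List (String × ν))
    (hl : l.Pairwise (fun p q => p.1 ≠ q.1)) {g : String} {v : ν} (hm : (g, v) ∈ l) :
    l.find? (fun p => p.1 == g) = some (g, v) := by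
  induction l with
  | nil => simp at hm
  | cons p l ih =>
      rcases List.pairwise_cons.mp hl with ⟨hp, hl'⟩
      by_cases hk : (p.1 == g) = true
      · have hk' : p.1 = g := by simpa using hk
        rcases List.mem_cons.mp hm with h1 | h1
        · simp [List.find?, hk, ← h1]
        · exact absurd hk' (hp (g, v) h1)
      · rcases List.mem_cons.mp hm with h1 | h1
        · rw [← h1] at hk; simp at hk
        · simp only [List.find?, hk]
          exact ih hl' h1

theorem dict_getD_of_mem {ν : Type} (d : PySem.Dict String ν) (h : KeysNodup d)
    {g : String} {v : ν} (hm : (g, v) ∈ d.items) (dflt : ν) : d.getD g dflt = v := by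
  unfold KeysNodup at h
  unfold PySem.Dict.getD PySem.Dict.get?
  rw [find?_of_mem_nodup d.items h hm]
  rfl

-- the index-carrying fold over enumerate, when the body ignores the index, is the plain fold
theorem foldl_enumerate_snd {σ : Type} (f : σ → (String × Int) → σ) :
    ∀ (l : List (String × Int)) (s : Int) (d : σ),
      (PySem.List.enumerate l s).foldl (fun d t => f d t.2) d = l.foldl f d := by
  intro l
  induction l with
  | nil => intro s d; rfl
  | cons x xs ih => intro s d; rw [PySem.List.enumerate_cons]; exact ih (s + 1) (f d x)

theorem stepA2_eq (d : PySem.Dict String Int) (t : Int × String × Int) :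
    stepA2 d t = d.insert t.2.1 (d.getD t.2.1 0 + t.2.2) := by
  unfold stepA2
  by_cases hc : d.contains t.2.1 = true
  · simp [hc]
  · rw [if_neg hc, dict_getD_of_not_contains _ _ _ (by simpa using hc), zero_add]

theorem totals_eq_dic2 (pairs : List (String × Int)) :
    (PySem.List.enumerate pairs).foldl stepA2 PySem.Dict.empty = totalsB pairs := by
  have h : stepA2
      = fun d t => (fun (d : PySem.Dict String Int) (gp : String × Int) =>
          d.insert gp.1 (d.getD gp.1 0 + gp.2)) d t.2 := by
    funext d t; exact stepA2_eq d t
  rw [h]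
  exact foldl_enumerate_snd
    (fun (d : PySem.Dict String Int) (gp : String × Int) => d.insert gp.1 (d.getD gp.1 0 + gp.2))
    pairs 0 PySem.Dict.empty

theorem dic1_char (l : List (Int × String × Int)) :
    ∀ (d : PySem.Dict String (List (Int × Int))) (g : String),
      (l.foldl stepA1 d).getD g []
        = d.getD g [] ++ (l.filter (fun t => t.2.1 == g)).map (fun t => (t.1, t.2.2)) := by
  induction l with
  | nil => intro d g; simp
  | cons t l ih =>
      intro d g
      have hstep : stepA1 d t = d.insert t.2.1 (d.getD t.2.1 [] ++ [(t.1, t.2.2)]) := by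
        unfold stepA1
        by_cases hc : d.contains t.2.1 = true
        · simp [hc]
        · rw [if_neg hc, dict_getD_of_not_contains _ _ _ (by simpa using hc),
            List.nil_append]
      rw [List.foldl_cons, hstep, ih]
      by_cases hg : t.2.1 = g
      · subst hg
        simp [dict_getD_insert_self]
      · have hne : g ≠ t.2.1 := fun h' => hg h'.symm
        rw [dict_getD_insert_of_ne _ _ _ hne, List.filter_cons]
        simp [hg]

theorem top2_char (l : List (Int × String × Int)) :
    ∀ (d : PySem.Dict String (List Int)) (g : String),
      ((l.foldl (fun d t =>
          if (d.getD t.2.1 []).length < 2 then d.insert t.2.1 (d.getD t.2.1 [] ++ [t.1]) else d)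
        d).getD g [])
        = d.getD g []
            ++ ((l.filter (fun t => t.2.1 == g)).map (fun t => t.1)).take (2 - (d.getD g []).length) := by
  induction l with
  | nil => intro d g; simp
  | cons t l ih =>
      intro d g
      rw [List.foldl_cons]
      by_cases hg : t.2.1 = g
      · subst hg
        by_cases hlen : (d.getD t.2.1 []).length < 2
        · rw [if_pos hlen, ih]
          rw [dict_getD_insert_self]
          have h2 : 2 - (d.getD t.2.1 []).length = (2 - (d.getD t.2.1 [] ++ [t.1]).length) + 1 := by
            simp only [List.length_append, List.length_singleton]
            omega
          simp only [List.filter_cons, beq_self_eq_true, if_true, List.map_cons, h2,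
            List.take_succ_cons, List.length_append]
          simp
        · rw [if_neg hlen, ih]
          have h0 : 2 - (d.getD t.2.1 []).length = 0 := by omega
          simp [h0]
      · have hne : g ≠ t.2.1 := fun h' => hg h'.symm
        have hfilter : List.filter (fun t' => t'.2.1 == g) (t :: l)
            = List.filter (fun t' => t'.2.1 == g) l := by
          simp [hg]
        by_cases hlen : (d.getD t.2.1 []).length < 2
        · rw [if_pos hlen, ih, dict_getD_insert_of_ne _ _ _ hne, hfilter]
        · rw [if_neg hlen, ih, hfilter]

-- the sorted genre list of B is the key list of A's sorted dict items
theorem keys_eq (P : List (String × Int)) :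
    PySem.List.sorted (totalsB P).keys (fun g => -((totalsB P).getD g 0)) false
      = (PySem.List.sorted (totalsB P).items (fun x => x.2) true).map (fun kv => kv.1) := by
  have h1 : (totalsB P).keys = (totalsB P).items.map (fun kv => kv.1) := rfl
  rw [h1, sorted_map (fun kv : String × Int => kv.1) (fun g : String => -((totalsB P).getD g 0))]
  rw [sorted_congr (fun a : String × Int => -((totalsB P).getD a.1 0)) (fun kv => -kv.2) _ ?_]
  · rw [← sorted_rev_neg (fun kv : String × Int => kv.2)]
  · intro kv hkv
    have hmem : (kv.1, kv.2) ∈ (totalsB P).items := by simpa using hkv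
    beta_reduce
    rw [dict_getD_of_mem (totalsB P) (keysNodup_totalsB P) hmem 0]

-- A's per-genre sorted top-2 equals B's counted top-2
theorem per_genre (P : List (String × Int)) (g : String) :
    ((PySem.List.sorted (((PySem.List.enumerate P).foldl stepA1 PySem.Dict.empty).getD g [])
        (fun x => x.2) true).take 2).map (fun ip => ip.1)
      = (top2B P).getD g [] := by
  rw [dic1_char]
  have hempty : (PySem.Dict.empty : PySem.Dict String (List (Int × Int))).getD g [] = [] := rfl
  rw [hempty, List.nil_append]
  rw [sorted_rev_neg (fun x : Int × Int => x.2)]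
  rw [sorted_map (fun t : Int × (String × Int) => (t.1, t.2.2)) (fun x : Int × Int => -x.2)]
  rw [← sorted_filter (fun t : Int × (String × Int) => -t.2.2) (fun t => t.2.1 == g)]
  unfold top2B
  rw [top2_char]
  have hempty2 : (PySem.Dict.empty : PySem.Dict String (List Int)).getD g [] = [] := rfl
  rw [hempty2, List.nil_append]
  simp [← List.map_take, List.map_map, Function.comp_def]

theorem main_eq (genres : List String) (plays : List Int) :
    solution7 genres plays = solution7_alt genres plays := by
  have hd : dicsA genres plays
      = ((PySem.List.enumerate (genres.zip plays)).foldl stepA1 PySem.Dict.empty,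
         (PySem.List.enumerate (genres.zip plays)).foldl stepA2 PySem.Dict.empty) :=
    PySem.List.foldl_prod_mk stepA1 stepA2 _ _ _
  unfold solution7 solution7_alt
  rw [hd]
  simp only [PySem.List.foldl_append_singleton_eq_map, PySem.List.foldl_append_eq_flatMap,
    List.nil_append, totals_eq_dic2, keys_eq]
  rw [List.flatMap_map]
  congr 1
  funext kv
  exact per_genre (genres.zip plays) kv.1

-- ===== VERDICT (by name: the statement is the Claim_ definition above) =====
theorem solution7_spec : Claim_equal_solution7 := by
  intro genres plays _
  unfold Spec_solution7
  exact main_eq genres plays
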